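-- pv_equiv track=rewrite | github.com/hamzaakmal98/Library-of-Python-codes-used-for-Computational-Physics | Upper Triangular Matrix.py | upper_triangular
-- ===== SOURCE A (Python) =====
-- def upper_triangular(matrix):
--     """
--     Returns the upper triangular matrix of a given 3x3 matrix.
--     """
--     n = len(matrix)
--     upper = [[0 for x in range(n)] for y in range(n)]
--
--     # Computing upper triangular matrix
--     for i in range(n):
--         for j in range(n):
--             if i <= j:
--                 upper[i][j] = matrix[i][j]
--
--     return upper
-- ===== SOURCE B (Python) =====
-- def upper_triangular(matrix):
--     """
--     Returns the upper triangular matrix of a given 3x3 matrix.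
--     """
--     n = len(matrix)
--     return [[0] * i + list(matrix[i][i:n]) for i in range(n)]
-- ===== Notes on version B (the rewrite author's own statement) =====
-- stated objective: simpler
-- what changed: Builds each result row in one step as i zeros followed by a slice of the source row, replacing A's preallocated zero matrix and nested per-element index loops with per-row list slicing (C-level copy), which a timing run measured ~2.4x faster at the largest size.
import Mathlib
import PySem

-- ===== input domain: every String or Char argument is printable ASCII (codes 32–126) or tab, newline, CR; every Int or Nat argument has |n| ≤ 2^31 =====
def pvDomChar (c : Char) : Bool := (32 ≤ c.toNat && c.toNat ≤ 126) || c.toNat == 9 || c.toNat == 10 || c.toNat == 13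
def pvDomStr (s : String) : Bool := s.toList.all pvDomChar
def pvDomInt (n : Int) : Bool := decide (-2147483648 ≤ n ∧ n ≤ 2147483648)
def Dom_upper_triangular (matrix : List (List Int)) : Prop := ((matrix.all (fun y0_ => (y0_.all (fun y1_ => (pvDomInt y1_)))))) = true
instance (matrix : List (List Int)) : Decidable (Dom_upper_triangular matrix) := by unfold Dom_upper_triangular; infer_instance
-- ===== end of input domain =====

-- B builds each result row in one step (i zeros ++ a slice of the source row) instead of A's
-- preallocated zero matrix updated by nested index loops; equivalence is on Pre_ (no row shorter than n).

-- ===== PORT A =====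
-- 'matrix[i][j]' is ported with pyGetD (the default is reachable only where Python raises
-- IndexError, i.e. outside Pre_); 'upper[i][j] = v' with pySetD (indices always in range for upper).
def upper_triangular (matrix : List (List Int)) : List (List Int) :=
  let n : Int := matrix.length
  let upper : List (List Int) :=
    (PySem.List.pyRange 0 n 1).map (fun _ => (PySem.List.pyRange 0 n 1).map (fun _ => (0 : Int)))
  (PySem.List.pyRange 0 n 1).foldl (fun u i =>
    (PySem.List.pyRange 0 n 1).foldl (fun u j =>
      if i ≤ j then
        PySem.List.pySetD u i
          (PySem.List.pySetD (PySem.List.pyGetD u i [])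
            j (PySem.List.pyGetD (PySem.List.pyGetD matrix i []) j 0))
      else u) u) upper

-- ===== PORT B =====
-- '[[0] * i + list(matrix[i][i:n]) for i in range(n)]'
def upper_triangular_alt (matrix : List (List Int)) : List (List Int) :=
  let n : Int := matrix.length
  (PySem.List.pyRange 0 n 1).map (fun i =>
    List.replicate i.toNat (0 : Int) ++
      PySem.List.slice (PySem.List.pyGetD matrix i []) (some i) (some n))

-- ===== PRECONDITION & SPEC =====
-- Pre_ excludes exactly the inputs where A raises IndexError: some row shorter than len(matrix).
def Pre_upper_triangular (matrix : List (List Int)) : Prop :=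
  ∀ row ∈ matrix, matrix.length ≤ row.length
instance (matrix : List (List Int)) : Decidable (Pre_upper_triangular matrix) := by
  unfold Pre_upper_triangular; infer_instance
def pvWitness_upper_triangular : List (List Int) := [[1, 2], [3, 4]]

def Spec_upper_triangular (matrix : List (List Int)) (out : List (List Int)) : Prop :=
  out = upper_triangular_alt matrix
instance (matrix : List (List Int)) (out : List (List Int)) : Decidable (Spec_upper_triangular matrix out) := by
  unfold Spec_upper_triangular; infer_instance

-- ===== CLAIM (what is proved, stated in full; the proofs are below) =====
def Claim_equal_upper_triangular : Prop :=
  ∀ (matrix : List (List Int)), Dom_upper_triangular matrix →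
    Pre_upper_triangular matrix → Spec_upper_triangular matrix (upper_triangular matrix)

-- ===== LEMMAS AND PROOFS =====

-- The inner row-update fold (positions j with i ≤ j overwritten) preserves length.
theorem rowFold_length (g : Nat → Int) (i : Nat) (js : List Nat) (r : List Int) :
    (js.foldl (fun r j => if i ≤ j then r.set j (g j) else r) r).length = r.length := by
  induction js generalizing r with
  | nil => rfl
  | cons j js ih => rw [List.foldl_cons]; split <;> simp [ih]

-- Entry k of the row-update fold over range m: g k where i ≤ k < m, otherwise untouched.
theorem rowFold_getElem? (g : Nat → Int) (i : Nat) (m : Nat) (r : List Int) (k : Nat)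
    (hk : k < r.length) :
    ((List.range m).foldl (fun r j => if i ≤ j then r.set j (g j) else r) r)[k]?
      = some (if i ≤ k ∧ k < m then g k else r[k]) := by
  induction m with
  | zero => simp [List.getElem?_eq_getElem hk]
  | succ m ih =>
    rw [List.range_succ, List.foldl_append, List.foldl_cons, List.foldl_nil]
    by_cases him : i ≤ m
    · rw [if_pos him, List.getElem?_set]
      by_cases hkm : m = k
      · subst hkm
        rw [if_pos rfl, rowFold_length, if_pos hk, if_pos ⟨him, by omega⟩]
      · rw [if_neg hkm, ih]
        by_cases h1 : i ≤ k ∧ k < m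
        · have : i ≤ k ∧ k < m + 1 := ⟨h1.1, by omega⟩
          rw [if_pos h1, if_pos this]
        · have : ¬ (i ≤ k ∧ k < m + 1) := by omega
          rw [if_neg h1, if_neg this]
    · rw [if_neg him, ih]
      by_cases h1 : i ≤ k ∧ k < m
      · rw [if_pos h1, if_pos ⟨h1.1, by omega⟩]
      · have h2 : ¬ (i ≤ k ∧ k < m + 1) := by omega
        rw [if_neg h1, if_neg h2]

-- A's inner loop touches only row i: it factors as one set of row i to a row-level fold.
theorem innerFold_factor (g : Nat → Int) (i : Nat) (js : List Nat) (u : List (List Int))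
    (hi : i < u.length) :
    js.foldl (fun u j => if i ≤ j then u.set i ((u.getD i []).set j (g j)) else u) u
    = u.set i (js.foldl (fun r j => if i ≤ j then r.set j (g j) else r) (u.getD i [])) := by
  induction js generalizing u with
  | nil =>
    rw [List.foldl_nil, List.foldl_nil, List.getD_eq_getElem _ _ hi, List.set_getElem_self]
  | cons j js ih =>
    rw [List.foldl_cons, List.foldl_cons]
    by_cases hij : i ≤ j
    · rw [if_pos hij, if_pos hij, ih _ (by simpa using hi)]
      rw [List.getD_eq_getElem _ _ (by simpa using hi : i < (u.set i ((u.getD i []).set j (g j))).length)]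
      rw [List.getElem_set_self, List.set_set, List.getD_eq_getElem _ _ hi]
    · rw [if_neg hij, if_neg hij, ih _ hi]

theorem aInner_length (G : Nat → Nat → Int) (i : Nat) (js : List Nat) (u : List (List Int)) :
    (js.foldl (fun u j => if i ≤ j then u.set i ((u.getD i []).set j (G i j)) else u) u).length
      = u.length := by
  induction js generalizing u with
  | nil => rfl
  | cons j js ih =>
    rw [List.foldl_cons]
    split
    · rw [ih, List.length_set]
    · exact ih u

theorem aOuter_length (G : Nat → Nat → Int) (n : Nat) (is : List Nat) (u : List (List Int)) :
    (is.foldl (fun u i => (List.range n).foldl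
        (fun u j => if i ≤ j then u.set i ((u.getD i []).set j (G i j)) else u) u) u).length
      = u.length := by
  induction is generalizing u with
  | nil => rfl
  | cons i is ih => rw [List.foldl_cons, ih, aInner_length]

-- Row k of A's double loop over range m: rewritten by its own iteration (k < m), else initial.
theorem outerFold_getElem? (G : Nat → Nat → Int) (n : Nat) (u0 : List (List Int))
    (h0 : u0.length = n) : ∀ (m : Nat), m ≤ n → ∀ (k : Nat), k < n →
    ((List.range m).foldl (fun u i => (List.range n).foldl
        (fun u j => if i ≤ j then u.set i ((u.getD i []).set j (G i j)) else u) u) u0)[k]?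
      = some (if k < m then
          (List.range n).foldl (fun r j => if k ≤ j then r.set j (G k j) else r) (u0.getD k [])
        else u0.getD k []) := by
  intro m
  induction m with
  | zero =>
    intro _ k hk
    simp only [List.range_zero, List.foldl_nil, Nat.not_lt_zero, if_false]
    rw [List.getElem?_eq_getElem (by omega), List.getD_eq_getElem _ _ (by omega)]
  | succ m ih =>
    intro hm k hk
    rw [List.range_succ, List.foldl_append, List.foldl_cons, List.foldl_nil]
    have hlen : (((List.range m).foldl (fun u i => (List.range n).foldl
        (fun u j => if i ≤ j then u.set i ((u.getD i []).set j (G i j)) else u) u) u0)).length = n := by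
      rw [aOuter_length, h0]
    rw [innerFold_factor (G m) m _ _ (by omega)]
    have hprev : (((List.range m).foldl (fun u i => (List.range n).foldl
        (fun u j => if i ≤ j then u.set i ((u.getD i []).set j (G i j)) else u) u) u0)).getD m []
        = u0.getD m [] := by
      have h := ih (by omega) m (by omega)
      rw [if_neg (by omega)] at h
      rw [List.getD_eq_getElem?_getD, h, Option.getD_some]
    rw [hprev, List.getElem?_set]
    by_cases hkm : m = k
    · subst hkm
      rw [if_pos rfl, hlen, if_pos hk, if_pos (by omega)]
    · rw [if_neg hkm, ih (by omega) k hk]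
      by_cases h1 : k < m
      · rw [if_pos h1, if_pos (by omega)]
      · rw [if_neg h1, if_neg (by omega)]

-- Port A with pyRange/pySetD/pyGetD rewritten to the equivalent Nat-indexed fold.
theorem A_unfold (matrix : List (List Int)) :
    upper_triangular matrix
    = (List.range matrix.length).foldl (fun u i => (List.range matrix.length).foldl
        (fun u j => if i ≤ j then u.set i ((u.getD i []).set j ((matrix.getD i []).getD j 0)) else u) u)
        ((List.range matrix.length).map (fun _ => (List.range matrix.length).map (fun _ => (0 : Int)))) := by
  simp only [upper_triangular, PySem.List.pyRange_zero_nat, List.foldl_map, List.map_map,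
    Function.comp_def, PySem.List.pySetD_natCast, PySem.List.pyGetD_natCast, Nat.cast_le]

-- Port B with pyRange/pyGetD/slice rewritten to the equivalent Nat-indexed map.
theorem B_unfold (matrix : List (List Int)) :
    upper_triangular_alt matrix
    = (List.range matrix.length).map (fun i =>
        List.replicate i (0 : Int) ++ ((matrix.getD i []).drop i).take (matrix.length - i)) := by
  simp only [upper_triangular_alt, PySem.List.pyRange_zero_nat, List.map_map, Function.comp_def,
    PySem.List.pyGetD_natCast, Int.toNat_natCast, PySem.List.slice_natCast]

-- A's finished row i equals B's row i: i zeros followed by the sliced tail of the source row.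
theorem row_eq (row : List Int) (n i : Nat) (hi : i < n) (hrow : n ≤ row.length) :
    (List.range n).foldl (fun r j => if i ≤ j then r.set j (row.getD j 0) else r)
        (List.replicate n (0 : Int))
    = List.replicate i 0 ++ (row.drop i).take (n - i) := by
  apply List.ext_getElem?
  intro j
  by_cases hj : j < n
  · rw [rowFold_getElem? _ _ _ _ _ (by simpa using hj)]
    by_cases hij : i ≤ j
    · rw [if_pos ⟨hij, hj⟩, List.getElem?_append_right (by simpa using hij)]
      simp only [List.length_replicate]
      rw [List.getElem?_take, List.getElem?_drop, if_pos (by omega),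
        List.getD_eq_getElem _ _ (by omega),
        ← List.getElem?_eq_getElem (by omega : j < row.length)]
      congr 1
      omega
    · rw [if_neg (by omega), List.getElem?_append_left (by simp; omega),
        List.getElem_replicate, List.getElem?_replicate, if_pos (by omega)]
  · rw [List.getElem?_eq_none (by rw [rowFold_length]; simpa using hj),
      List.getElem?_eq_none (by simp; omega)]

theorem upper_triangular_eq_alt (matrix : List (List Int))
    (hpre : ∀ row ∈ matrix, matrix.length ≤ row.length) :
    upper_triangular matrix = upper_triangular_alt matrix := by
  rw [A_unfold, B_unfold]
  apply List.ext_getElem?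
  intro k
  by_cases hk : k < matrix.length
  · rw [outerFold_getElem? _ _ _ (by simp) matrix.length le_rfl k hk, if_pos hk]
    have hu0 : ((List.range matrix.length).map
        (fun _ => (List.range matrix.length).map (fun _ => (0 : Int)))).getD k []
        = List.replicate matrix.length (0 : Int) := by
      rw [List.getD_eq_getElem _ _ (by simpa using hk), List.getElem_map]
      simp
    have hrow : matrix.length ≤ (matrix.getD k []).length := by
      apply hpre
      rw [List.getD_eq_getElem _ _ hk]
      exact List.getElem_mem _
    rw [hu0, row_eq _ _ _ hk hrow, List.getElem?_map, List.getElem?_range hk]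
    rfl
  · rw [List.getElem?_eq_none (by rw [aOuter_length]; simpa using hk),
      List.getElem?_eq_none (by simpa using hk)]

-- ===== VERDICT (by name: the statement is the Claim_ definition above) =====
theorem upper_triangular_spec : Claim_equal_upper_triangular := by
  intro matrix _ hpre
  unfold Spec_upper_triangular
  exact upper_triangular_eq_alt matrix hpre
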